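-- pv_equiv track=rewrite | github.com/sksmslhy/Java_Lexical_and_Syntax_Analyzer | main.py | isSignedINT
-- ===== SOURCE A (Python) =====
-- ZERO = ['0']
--
-- MINUS = ['-']
--
-- NON_ZERO = ['1','2','3','4','5','6','7','8','9']
--
-- def isSignedINT(token):
--     state = ['T0', 'T1', 'T2', 'T3', 'T4', 'T5']
--     locate = state[0]
--     for value in token:
--         if locate == state[0]:
--             if value in ZERO:
--                 locate = state[1]
--             elif value in NON_ZERO:
--                 locate = state[3]
--             elif value in MINUS:
--                 locate = state[2]
--             else:
--                 return False
--         elif locate == state[2]: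
--             if value in NON_ZERO:
--                 locate = state[3]
--             else:
--                 return False
--         elif locate == state[3]:
--             if value in ZERO:
--                 locate = state[4]
--             elif value in NON_ZERO:
--                 locate = state[5]
--             else:
--                 return False
--         elif locate == state[4]:
--             if value in ZERO:
--                 locate = state[4]
--             elif value in NON_ZERO:
--                 locate = state[5]
--             else:
--                 return False
--         elif locate == state[5]:
--             if value in ZERO:
--                 locate = state[4]
--             elif value in NON_ZERO:
--                 locate = state[5]
--             else:
--                 return False
--         else:
--             return False
--
--     if locate == state[1] or locate == state[3] or locate == state[4] or locate == state[5]: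
--         return True
--     else:
--         return False
-- ===== SOURCE B (Python) =====
-- def isSignedINT(token):
--     neg = token.startswith('-')
--     body = token[1:] if neg else token
--     if not body:
--         return False
--     if body == '0':
--         return not neg
--     return body[0] in '123456789' and all(c in '0123456789' for c in body[1:])
-- ===== Notes on version B (the rewrite author's own statement) =====
-- stated objective: simpler
-- what changed: Replaced the explicit six-state DFA loop with a direct decomposition: strip an optional leading minus sign, accept a lone zero only when unsigned, otherwise require a nonzero leading digit followed by digits.
import Mathlib
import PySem

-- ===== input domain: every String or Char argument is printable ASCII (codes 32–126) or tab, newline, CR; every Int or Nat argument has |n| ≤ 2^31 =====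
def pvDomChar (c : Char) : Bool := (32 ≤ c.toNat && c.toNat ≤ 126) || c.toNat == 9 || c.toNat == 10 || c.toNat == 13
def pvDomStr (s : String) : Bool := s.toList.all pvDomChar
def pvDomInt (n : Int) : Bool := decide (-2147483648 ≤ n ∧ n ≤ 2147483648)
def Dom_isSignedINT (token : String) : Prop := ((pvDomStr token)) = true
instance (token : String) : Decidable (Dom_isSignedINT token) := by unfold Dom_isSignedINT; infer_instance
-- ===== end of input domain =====

-- B replaces A's six-state DFA loop with a sign-strip + leading-digit + all-digits decomposition (simpler, same O(n) cost).

-- ===== PORT A =====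
def pvZERO : List Char := ['0']
def pvMINUS : List Char := ['-']
def pvNONZERO : List Char := ['1','2','3','4','5','6','7','8','9']

-- the for-loop with early 'return False'; at end of input the final acceptance test
def isSignedINT_loop : String → List Char → Bool
  | locate, [] =>
      locate == "T1" || locate == "T3" || locate == "T4" || locate == "T5"
  | locate, value :: rest =>
      if locate == "T0" then
        if pvZERO.contains value then isSignedINT_loop "T1" rest
        else if pvNONZERO.contains value then isSignedINT_loop "T3" rest
        else if pvMINUS.contains value then isSignedINT_loop "T2" rest
        else false
      else if locate == "T2" then
        if pvNONZERO.contains value then isSignedINT_loop "T3" rest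
        else false
      else if locate == "T3" then
        if pvZERO.contains value then isSignedINT_loop "T4" rest
        else if pvNONZERO.contains value then isSignedINT_loop "T5" rest
        else false
      else if locate == "T4" then
        if pvZERO.contains value then isSignedINT_loop "T4" rest
        else if pvNONZERO.contains value then isSignedINT_loop "T5" rest
        else false
      else if locate == "T5" then
        if pvZERO.contains value then isSignedINT_loop "T4" rest
        else if pvNONZERO.contains value then isSignedINT_loop "T5" rest
        else false
      else false

def isSignedINT (token : String) : Bool := isSignedINT_loop "T0" token.toList

-- ===== PORT B =====
def pvNZ : List Char := ['1','2','3','4','5','6','7','8','9']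
def pvDIGITS : List Char := ['0','1','2','3','4','5','6','7','8','9']

def isSignedINT_altList (chars : List Char) : Bool :=
  let neg := chars.head? == some '-'
  let body := if neg then chars.tail else chars
  match body with
  | [] => false
  | b :: bs =>
      if b :: bs = ['0'] then !neg
      else pvNZ.contains b && bs.all (fun c => pvDIGITS.contains c)

def isSignedINT_alt (token : String) : Bool := isSignedINT_altList token.toList

-- ===== PRECONDITION & SPEC =====
def Spec_isSignedINT (token : String) (out : Bool) : Prop := out = isSignedINT_alt token
instance (token : String) (out : Bool) : Decidable (Spec_isSignedINT token out) := by unfold Spec_isSignedINT; infer_instance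

-- ===== CLAIM (what is proved, stated in full; the proofs are below) =====
def Claim_equal_isSignedINT : Prop := ∀ (token : String), Dom_isSignedINT token → Spec_isSignedINT token (isSignedINT token)

-- ===== LEMMAS AND PROOFS =====

-- in states T3/T4/T5 the loop accepts exactly a (possibly empty) run of digits
theorem loop345 (l : List Char) :
    isSignedINT_loop "T3" l = l.all (fun c => pvDIGITS.contains c) ∧
    isSignedINT_loop "T4" l = l.all (fun c => pvDIGITS.contains c) ∧
    isSignedINT_loop "T5" l = l.all (fun c => pvDIGITS.contains c) := by
  induction l with
  | nil => decide
  | cons c rest ih =>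
      obtain ⟨h3, h4, h5⟩ := ih
      refine ⟨?_, ?_, ?_⟩ <;>
        · simp only [isSignedINT_loop, List.all_cons]
          by_cases h0 : c = '0'
          · subst h0; simp [pvZERO, pvNONZERO, pvDIGITS, h4]
          · by_cases hn : c ∈ pvNONZERO
            · have hd : c ∈ pvDIGITS := by
                simp [pvNONZERO] at hn
                rcases hn with h|h|h|h|h|h|h|h|h <;> simp [pvDIGITS, h]
              simp [pvZERO, h0, hn, h5, hd]
            · have hd : c ∉ pvDIGITS := by
                simp [pvNONZERO] at hn
                simp [pvDIGITS, h0]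
                tauto
              simp [pvZERO, h0, hn, hd]

theorem loopT1 (l : List Char) : isSignedINT_loop "T1" l = l.isEmpty := by
  cases l <;> simp [isSignedINT_loop]

theorem main_list (l : List Char) : isSignedINT_loop "T0" l = isSignedINT_altList l := by
  cases l with
  | nil => decide
  | cons c rest =>
      simp only [isSignedINT_loop, isSignedINT_altList]
      by_cases h0 : c = '0'
      · subst h0
        simp [pvZERO, pvNONZERO, pvMINUS, loopT1]
        cases rest with
        | nil => decide
        | cons d r2 => simp [pvNZ]
      · by_cases hn : c ∈ pvNONZERO
        · have hcm : c ≠ '-' := by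
            intro h; subst h; simp [pvNONZERO] at hn
          have hnz : c ∈ pvNZ := by simpa [pvNONZERO, pvNZ] using hn
          have hne : ¬ (c :: rest = ['0']) := by
            intro h; exact h0 (by injection h)
          simp [pvZERO, h0, hn, (loop345 rest).1, hcm, hne, hnz]
        · by_cases hm : c = '-'
          · subst hm
            simp [pvZERO, pvNONZERO, pvMINUS]
            cases rest with
            | nil => decide
            | cons d r2 =>
                simp only [isSignedINT_loop]
                by_cases hdn : d ∈ pvNONZERO
                · have hd0 : d ≠ '0' := by
                    intro h; subst h; simp [pvNONZERO] at hdn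
                  have hne : ¬ (d :: r2 = ['0']) := by
                    intro h; exact hd0 (by injection h)
                  simp [pvNONZERO, pvMINUS, pvZERO, hdn, (loop345 r2).1, hne,
                    show ("T2" : String) ≠ "T0" from by decide]
                  simp [pvNONZERO] at hdn
                  rcases hdn with h|h|h|h|h|h|h|h|h <;> subst h <;> simp [pvNZ]
                · by_cases he : d :: r2 = ['0']
                  · obtain ⟨h1, h2⟩ := List.cons_eq_cons.mp he
                    subst h1; subst h2; decide
                  · simp [pvNONZERO, pvMINUS, pvZERO, hdn, he,
                      show ("T2" : String) ≠ "T0" from by decide]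
                    simp [pvNONZERO] at hdn
                    obtain ⟨h1, h2, h3, h4, h5, h6, h7, h8, h9⟩ := hdn
                    simp [pvNZ, h1, h2, h3, h4, h5, h6, h7, h8, h9]
          · have hnz : c ∉ pvNZ := by
              simp [pvNONZERO] at hn
              simp [pvNZ]
              tauto
            have hne : ¬ (c :: rest = ['0']) := by
              intro h; exact h0 (by injection h)
            simp [pvZERO, pvMINUS, h0, hn, hm, hne, hnz]

-- ===== VERDICT (by name: the statement is the Claim_ definition above) =====
theorem isSignedINT_spec : Claim_equal_isSignedINT := by
  intro token _
  unfold Spec_isSignedINT isSignedINT isSignedINT_alt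
  exact main_list token.toList
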